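-- pv_equiv track=rewrite | github.com/divadnebnahtan/ling30015-final-research-project | old/data_generation_old.py | get_subtree_word_ids_conllu
-- ===== SOURCE A (Python) =====
-- from collections import Counter, defaultdict, deque
--
-- def build_dependents_index_conllu(sentence):
--     deps = defaultdict(list)
--     for token in sentence:
--         head = token.get("head", 0)
--         deps[head].append(token)
--     return deps
--
-- def get_subtree_word_ids_conllu(token_id, sentence):
--     """Get all word IDs in the dependency subtree rooted at token_id."""
--     deps = build_dependents_index_conllu(sentence)
--     ids = set()
--     stack = [token_id]
--
--     while stack:
--         cur = stack.pop()
--         if cur not in ids: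
--             ids.add(cur)
--             for child in deps.get(cur, []):
--                 stack.append(child.get("id"))
--
--     return ids
-- ===== SOURCE B (Python) =====
-- from collections import defaultdict
--
--
-- def get_subtree_word_ids_conllu(token_id, sentence):
--     """Get all word IDs in the dependency subtree rooted at token_id,
--     by recursive depth-first search instead of an explicit stack."""
--     deps = defaultdict(list)
--     for token in sentence:
--         deps[token.get("head", 0)].append(token)
--
--     ids = set()
--
--     def visit(cur):
--         if cur in ids:
--             return
--         ids.add(cur)
--         # right-to-left; the returned set does not depend on the order
--         for child in reversed(deps.get(cur, [])):
--             visit(child.get("id"))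
--
--     visit(token_id)
--     return ids
-- ===== Notes on version B (the rewrite author's own statement) =====
-- stated objective: alternative
-- what changed: The explicit-stack while-loop that collects the subtree is replaced by a recursive depth-first visit(cur) helper with the same visited-set guard; the head->children index builder is kept.
-- outside the precondition, e.g. on get_subtree_word_ids_conllu(0, [{'head': 0}]): A returns {0, None}, B returns {0, None}
import Mathlib
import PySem

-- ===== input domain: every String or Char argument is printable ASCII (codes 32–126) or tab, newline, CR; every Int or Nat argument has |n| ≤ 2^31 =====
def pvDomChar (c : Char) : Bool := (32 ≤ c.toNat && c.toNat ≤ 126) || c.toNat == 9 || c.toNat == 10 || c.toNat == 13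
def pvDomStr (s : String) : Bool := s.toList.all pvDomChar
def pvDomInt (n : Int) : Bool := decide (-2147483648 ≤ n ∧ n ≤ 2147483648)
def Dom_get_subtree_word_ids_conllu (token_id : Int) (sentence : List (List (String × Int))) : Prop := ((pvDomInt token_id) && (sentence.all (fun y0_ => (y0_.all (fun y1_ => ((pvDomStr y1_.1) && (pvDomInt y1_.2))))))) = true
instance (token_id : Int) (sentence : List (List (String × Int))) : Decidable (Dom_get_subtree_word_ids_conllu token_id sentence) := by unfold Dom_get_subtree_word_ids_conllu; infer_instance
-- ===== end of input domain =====

-- B replaces A's explicit-stack while-loop by a recursive depth-first search with the same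
-- visited-set guard (objective: alternative decomposition, same cost; return value only).

-- ===== PORT A =====

-- token.get("head", 0) / token.get("id") — first-match lookup on the token's association list.
def pvHead (t : List (String × Int)) : Int := (t.lookup "head").getD 0
-- Python returns None when "id" is missing; the default 0 is unreachable under Pre_ (which
-- excludes exactly the inputs whose result set would contain that None).
def pvId (t : List (String × Int)) : Int := (t.lookup "id").getD 0

def build_dependents_index_conllu (sentence : List (List (String × Int))) :
    PySem.Dict Int (List (List (String × Int))) :=
  sentence.foldl (fun d token => d.modify (pvHead token) [] (fun l => l ++ [token])) PySem.Dict.empty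

-- unvisited count: how many entries of U are not yet in ids (termination measure of A's loop)
def pvUnvis (U : List Int) (ids : PySem.Set Int) : Nat :=
  (U.filter (fun x => !(PySem.Set.contains ids x))).length

-- 'for child in children: stack.append(child.get("id"))' pushes, i.e. conses, each id in turn
theorem pvPushAll (l : List (List (String × Int))) (init : List Int) :
    l.foldl (fun st t => pvId t :: st) init = (l.map pvId).reverse ++ init := by
  induction l generalizing init with
  | nil => rfl
  | cons x xs ih => simp [List.foldl_cons, ih]

theorem pvFilterLenMono {α : Type} (p q : α → Bool) (U : List α) (h : ∀ x ∈ U, p x = true → q x = true) :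
    (U.filter p).length ≤ (U.filter q).length := by
  induction U with
  | nil => simp
  | cons x xs ih =>
    have ih' := ih (fun y hy => h y (List.mem_cons_of_mem _ hy))
    by_cases hp : p x = true
    · simp only [List.filter_cons, hp, h x (List.mem_cons_self) hp, if_true, List.length_cons]
      omega
    · rw [Bool.not_eq_true] at hp
      simp only [List.filter_cons, hp]
      by_cases hq : q x = true <;> simp only [hq, Bool.false_eq_true, if_true, if_false, List.length_cons] <;> omega

theorem pvFilterLenLt {α : Type} [DecidableEq α] (p q : α → Bool) (U : List α) (c : α)
    (h : ∀ x ∈ U, p x = true → q x = true) (hcU : c ∈ U) (hp : p c = false) (hq : q c = true) :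
    (U.filter p).length < (U.filter q).length := by
  induction U with
  | nil => cases hcU
  | cons x xs ih =>
    by_cases hx : x = c
    · subst hx
      simp only [List.filter_cons, hp, hq, Bool.false_eq_true, if_false, if_true, List.length_cons]
      have := pvFilterLenMono p q xs (fun y hy => h y (List.mem_cons_of_mem _ hy))
      omega
    · have hcU' : c ∈ xs := by cases hcU with | head => exact absurd rfl hx | tail _ hh => exact hh
      have ih' := ih (fun y hy => h y (List.mem_cons_of_mem _ hy)) hcU'
      simp only [List.filter_cons]
      by_cases hpx : p x = true
      · have hqx := h x List.mem_cons_self hpx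
        simp only [hpx, hqx, if_true, List.length_cons]
        omega
      · rw [Bool.not_eq_true] at hpx
        simp only [hpx, Bool.false_eq_true, if_false]
        by_cases hqx : q x = true <;> simp only [hqx, Bool.false_eq_true, if_true, if_false, List.length_cons] <;> omega

theorem pvNotMemAdd_imp (ids : PySem.Set Int) (cur x : Int)
    (h : (!(PySem.Set.contains (PySem.Set.add ids cur) x)) = true) :
    (!(PySem.Set.contains ids x)) = true := by
  rw [Bool.not_eq_eq_eq_not, Bool.not_true, Bool.eq_false_iff] at h ⊢
  intro hm
  exact h ((PySem.Set.contains_iff _ x).2 ((PySem.Set.mem_add ids cur x).2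
    (Or.inl ((PySem.Set.contains_iff ids x).1 hm))))

theorem pvUnvis_add_lt (U : List Int) (ids : PySem.Set Int) (cur : Int)
    (hU : cur ∈ U) (hc : ¬ PySem.Set.contains ids cur = true) :
    pvUnvis U (PySem.Set.add ids cur) < pvUnvis U ids := by
  unfold pvUnvis
  apply pvFilterLenLt _ _ U cur (fun x _ hx => pvNotMemAdd_imp ids cur x hx) hU
  · rw [Bool.not_eq_eq_eq_not, Bool.not_false]
    exact (PySem.Set.contains_iff _ cur).2 ((PySem.Set.mem_add ids cur cur).2 (Or.inr rfl))
  · rw [Bool.not_eq_true] at hc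
    rw [hc, Bool.not_false]

-- every token stored in the dependents index comes from the sentence
theorem pvDepsMem (sentence : List (List (String × Int))) (cur : Int) (t : List (String × Int))
    (h : t ∈ (build_dependents_index_conllu sentence).getD cur []) : t ∈ sentence := by
  unfold build_dependents_index_conllu at h
  suffices H : ∀ (S : List (List (String × Int))) (d : PySem.Dict Int (List (List (String × Int)))) (cur t),
      t ∈ (S.foldl (fun d token => d.modify (pvHead token) [] (fun l => l ++ [token])) d).getD cur [] →
      (∃ k, t ∈ d.getD k []) ∨ t ∈ S by
    rcases H sentence PySem.Dict.empty cur t h with ⟨k, hk⟩ | h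
    · rw [PySem.Dict.getD_empty] at hk; cases hk
    · exact h
  intro S
  induction S with
  | nil => intro d cur t h; exact Or.inl ⟨cur, h⟩
  | cons x xs ih =>
    intro d cur t h
    rcases ih _ cur t h with ⟨k, hk⟩ | hmem
    · unfold PySem.Dict.modify at hk
      rw [PySem.Dict.getD_insert] at hk
      by_cases hke : k = pvHead x
      · rw [if_pos hke] at hk
        rcases List.mem_append.1 hk with h1 | h2
        · exact Or.inl ⟨pvHead x, h1⟩
        · simp at h2; subst h2; exact Or.inr (List.mem_cons_self)
      · rw [if_neg hke] at hk; exact Or.inl ⟨k, hk⟩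
    · exact Or.inr (List.mem_cons_of_mem _ hmem)

-- A's while-loop. The stack is kept top-first (Python's append/pop work at the same end).
-- U and the two membership proofs exist only for termination; they do not affect the value.
def pvLoopA (deps : PySem.Dict Int (List (List (String × Int)))) (U : List Int)
    (hd : ∀ cur t, t ∈ deps.getD cur [] → pvId t ∈ U)
    (ids : PySem.Set Int) (stack : List Int)
    (hs : ∀ x ∈ stack, x ∈ U) : PySem.Set Int :=
  match stack with
  | [] => ids
  | cur :: rest =>
    if h : PySem.Set.contains ids cur then
      pvLoopA deps U hd ids rest (fun x hx => hs x (List.mem_cons_of_mem _ hx))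
    else
      pvLoopA deps U hd (PySem.Set.add ids cur)
        ((deps.getD cur []).foldl (fun st t => pvId t :: st) rest)
        (by intro x hx
            rw [pvPushAll] at hx
            rcases List.mem_append.1 hx with h1 | h2
            · rw [List.mem_reverse] at h1
              rcases List.mem_map.1 h1 with ⟨t, ht, rfl⟩
              exact hd cur t ht
            · exact hs x (List.mem_cons_of_mem _ h2))
  termination_by (pvUnvis U ids, stack.length)
  decreasing_by
  · exact Prod.Lex.right _ (Nat.lt_succ_self _)
  · exact Prod.Lex.left _ _ (pvUnvis_add_lt U ids cur (hs cur List.mem_cons_self) h)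

def get_subtree_word_ids_conllu (token_id : Int) (sentence : List (List (String × Int))) : List Int :=
  let deps := build_dependents_index_conllu sentence
  pvLoopA deps (token_id :: sentence.map pvId)
    (fun cur t ht => List.mem_cons_of_mem _ (List.mem_map.2 ⟨t, pvDepsMem sentence cur t ht, rfl⟩))
    PySem.Set.empty [token_id]
    (fun x hx => by rw [List.mem_singleton] at hx; exact hx ▸ List.mem_cons_self)

-- ===== PORT B =====

-- Source B's recursive visit(cur); fuel n+1 bounds the recursion depth (each level adds a fresh id,
-- and at most n+1 distinct ids can ever appear, so the fuel-0 branch is never the final answer's source).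
def pvVisitB (deps : PySem.Dict Int (List (List (String × Int)))) :
    Nat → Int → PySem.Set Int → PySem.Set Int
  | 0, _, ids => ids
  | f + 1, cur, ids =>
    if PySem.Set.contains ids cur then ids
    else ((deps.getD cur []).reverse).foldl
      (fun ids child => pvVisitB deps f ((child.lookup "id").getD 0) ids)
      (PySem.Set.add ids cur)

def get_subtree_word_ids_conllu_alt (token_id : Int) (sentence : List (List (String × Int))) : List Int :=
  let deps := sentence.foldl
    (fun d token => d.modify ((token.lookup "head").getD 0) [] (fun l => l ++ [token]))
    PySem.Dict.empty
  pvVisitB deps (sentence.length + 1) token_id PySem.Set.empty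

-- ===== PRECONDITION & SPEC =====
-- Pre_ excludes inputs on which A's returned set contains None (not an int): a reachable token
-- without an "id" key; tokens whose head is neither token_id nor some token's id are never reached,
-- so they may lack "id" freely.
def Pre_get_subtree_word_ids_conllu (token_id : Int) (sentence : List (List (String × Int))) : Prop :=
  ∀ t ∈ sentence,
    ((t.lookup "head").getD 0 = token_id ∨ ∃ u ∈ sentence, u.lookup "id" = some ((t.lookup "head").getD 0)) →
    (t.lookup "id").isSome = true
instance (token_id : Int) (sentence : List (List (String × Int))) : Decidable (Pre_get_subtree_word_ids_conllu token_id sentence) := by unfold Pre_get_subtree_word_ids_conllu; infer_instance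

def pvWitness_get_subtree_word_ids_conllu : Int × (List (List (String × Int))) :=
  (1, [[("id", 2), ("head", 1)], [("form", 7)]])

def Spec_get_subtree_word_ids_conllu (token_id : Int) (sentence : List (List (String × Int))) (out : List Int) : Prop := out = get_subtree_word_ids_conllu_alt token_id sentence
instance (token_id : Int) (sentence : List (List (String × Int))) (out : List Int) : Decidable (Spec_get_subtree_word_ids_conllu token_id sentence out) := by unfold Spec_get_subtree_word_ids_conllu; infer_instance

-- ===== CLAIM (what is proved, stated in full; the proofs are below) =====
def Claim_equal_get_subtree_word_ids_conllu : Prop := ∀ (token_id : Int) (sentence : List (List (String × Int))), Dom_get_subtree_word_ids_conllu token_id sentence → Pre_get_subtree_word_ids_conllu token_id sentence → Spec_get_subtree_word_ids_conllu token_id sentence (get_subtree_word_ids_conllu token_id sentence)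

-- ===== LEMMAS AND PROOFS =====

-- equation lemmas for pvVisitB (used instead of unfolding, which simp over-normalises)
theorem pvVisitB_zero (deps : PySem.Dict Int (List (List (String × Int)))) (cur : Int)
    (ids : PySem.Set Int) : pvVisitB deps 0 cur ids = ids := rfl

theorem pvVisitB_succ_pos (deps : PySem.Dict Int (List (List (String × Int)))) (f : Nat)
    (cur : Int) (ids : PySem.Set Int) (hc : PySem.Set.contains ids cur = true) :
    pvVisitB deps (f + 1) cur ids = ids := by
  rw [pvVisitB, if_pos hc]

theorem pvVisitB_succ_neg (deps : PySem.Dict Int (List (List (String × Int)))) (f : Nat)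
    (cur : Int) (ids : PySem.Set Int) (hc : ¬ PySem.Set.contains ids cur = true) :
    pvVisitB deps (f + 1) cur ids =
      ((deps.getD cur []).reverse).foldl
        (fun ids child => pvVisitB deps f ((child.lookup "id").getD 0) ids)
        (PySem.Set.add ids cur) := by
  rw [pvVisitB, if_neg hc]

-- visit only ever adds elements
theorem pvVisit_mono (deps : PySem.Dict Int (List (List (String × Int)))) :
    ∀ (f : Nat) (cur : Int) (ids : PySem.Set Int) (x : Int), x ∈ ids → x ∈ pvVisitB deps f cur ids := by
  intro f
  induction f with
  | zero => intro cur ids x hx; rw [pvVisitB_zero]; exact hx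
  | succ f ih =>
    have fold : ∀ (l : List (List (String × Int))) (ids : PySem.Set Int) (x : Int), x ∈ ids →
        x ∈ l.foldl (fun ids child => pvVisitB deps f ((child.lookup "id").getD 0) ids) ids := by
      intro l
      induction l with
      | nil => intro ids x hx; exact hx
      | cons c cs ihc => intro ids x hx; exact ihc _ x (ih _ ids x hx)
    intro cur ids x hx
    by_cases hc : PySem.Set.contains ids cur = true
    · rw [pvVisitB_succ_pos deps f cur ids hc]; exact hx
    · rw [pvVisitB_succ_neg deps f cur ids hc]
      exact fold _ _ x ((PySem.Set.mem_add ids cur x).2 (Or.inl hx))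

theorem pvUnvis_mono (U : List Int) (s s' : PySem.Set Int) (h : ∀ x, x ∈ s → x ∈ s') :
    pvUnvis U s' ≤ pvUnvis U s := by
  unfold pvUnvis
  apply pvFilterLenMono
  intro x _ hx
  rw [Bool.not_eq_eq_eq_not, Bool.not_true, Bool.eq_false_iff] at hx ⊢
  intro hmem
  exact hx ((PySem.Set.contains_iff s' x).2 (h x ((PySem.Set.contains_iff s x).1 hmem)))

theorem pvUnvis_zero (U : List Int) (ids : PySem.Set Int) (h : pvUnvis U ids = 0) :
    ∀ x ∈ U, PySem.Set.contains ids x = true := by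
  unfold pvUnvis at h
  rw [List.length_eq_zero_iff, List.filter_eq_nil_iff] at h
  intro x hx
  have := h x hx
  simpa using this

-- membership is preserved along the inner DFS fold
theorem pvFoldVisit_mono (deps : PySem.Dict Int (List (List (String × Int)))) (f : Nat) :
    ∀ (cs : List Int) (s : PySem.Set Int) (x : Int), x ∈ s →
      x ∈ cs.foldl (fun ids c => pvVisitB deps f c ids) s := by
  intro cs
  induction cs with
  | nil => intro s x hx; exact hx
  | cons c cs ihc => intro s x hx; exact ihc _ x (pvVisit_mono deps f c s x hx)

-- once the fuel covers the number of unvisited candidates, one more unit changes nothing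
theorem pvVisit_stab (deps : PySem.Dict Int (List (List (String × Int)))) (U : List Int)
    (hd : ∀ cur t, t ∈ deps.getD cur [] → pvId t ∈ U) :
    ∀ (f : Nat) (cur : Int) (ids : PySem.Set Int), cur ∈ U → pvUnvis U ids ≤ f →
      pvVisitB deps (f + 1) cur ids = pvVisitB deps f cur ids := by
  intro f
  induction f with
  | zero =>
    intro cur ids hU hle
    have hc : PySem.Set.contains ids cur = true :=
      pvUnvis_zero U ids (Nat.le_zero.1 hle) cur hU
    rw [pvVisitB_succ_pos deps 0 cur ids hc, pvVisitB_zero]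
  | succ f ih =>
    intro cur ids hU hle
    by_cases hc : PySem.Set.contains ids cur = true
    · rw [pvVisitB_succ_pos deps (f + 1) cur ids hc, pvVisitB_succ_pos deps f cur ids hc]
    · have hlt := pvUnvis_add_lt U ids cur hU hc
      have hle' : pvUnvis U (PySem.Set.add ids cur) ≤ f := by omega
      rw [pvVisitB_succ_neg deps (f + 1) cur ids hc, pvVisitB_succ_neg deps f cur ids hc]
      have hel : ∀ t ∈ (deps.getD cur []).reverse, pvId t ∈ U :=
        fun t ht => hd cur t (List.mem_reverse.1 ht)
      have key : ∀ (l : List (List (String × Int))), (∀ t ∈ l, pvId t ∈ U) →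
          ∀ (s : PySem.Set Int), pvUnvis U s ≤ f →
          l.foldl (fun ids child => pvVisitB deps (f + 1) ((child.lookup "id").getD 0) ids) s =
          l.foldl (fun ids child => pvVisitB deps f ((child.lookup "id").getD 0) ids) s := by
        intro l
        induction l with
        | nil => intro _ s _; rfl
        | cons c cs ihc =>
          intro hl s hsle
          simp only [List.foldl_cons]
          rw [ih ((List.lookup "id" c).getD 0) s (hl c List.mem_cons_self) hsle]
          exact ihc (fun t ht => hl t (List.mem_cons_of_mem _ ht)) _
            (le_trans (pvUnvis_mono U s _ (fun x hx => pvVisit_mono deps f _ s x hx)) hsle)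
      exact key _ hel _ hle'

theorem pvFold_stab (deps : PySem.Dict Int (List (List (String × Int)))) (U : List Int)
    (hd : ∀ cur t, t ∈ deps.getD cur [] → pvId t ∈ U) (f : Nat) :
    ∀ (cs : List Int) (ids : PySem.Set Int), (∀ c ∈ cs, c ∈ U) → pvUnvis U ids ≤ f →
      cs.foldl (fun ids c => pvVisitB deps (f + 1) c ids) ids =
      cs.foldl (fun ids c => pvVisitB deps f c ids) ids := by
  intro cs
  induction cs with
  | nil => intro ids _ _; rfl
  | cons c cs ihc =>
    intro ids hl hle
    have h1 : pvVisitB deps (f + 1) c ids = pvVisitB deps f c ids :=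
      pvVisit_stab deps U hd f c ids (hl c List.mem_cons_self) hle
    simp only [List.foldl_cons, h1]
    exact ihc _ (fun x hx => hl x (List.mem_cons_of_mem _ hx))
      (le_trans (pvUnvis_mono U ids _ (fun x hx => pvVisit_mono deps f c ids x hx)) hle)

-- the key invariant: A's stack loop is the fold of B's DFS over the stack, top first
theorem pvLoopA_eq_fold (deps : PySem.Dict Int (List (List (String × Int)))) (U : List Int)
    (hd : ∀ cur t, t ∈ deps.getD cur [] → pvId t ∈ U) :
    ∀ (ids : PySem.Set Int) (stack : List Int) (hs : ∀ x ∈ stack, x ∈ U) (f : Nat),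
      pvUnvis U ids ≤ f →
      pvLoopA deps U hd ids stack hs = stack.foldl (fun ids c => pvVisitB deps f c ids) ids := by
  intro ids stack hs
  induction ids, stack, hs using pvLoopA.induct deps U hd with
  | case1 ids hs _ => intro f _; simp only [pvLoopA, List.foldl_nil]
  | case2 ids cur rest hs h _ ih =>
    intro f hf
    rw [pvLoopA]
    simp only [h, dif_pos]
    have hvc : pvVisitB deps f cur ids = ids := by
      cases f with
      | zero => rfl
      | succ f => exact pvVisitB_succ_pos deps f cur ids h
    rw [ih f hf, List.foldl_cons, hvc]
  | case3 ids cur rest hs h _ ih =>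
    intro f hf
    have hUcur : cur ∈ U := hs cur List.mem_cons_self
    have hlt := pvUnvis_add_lt U ids cur hUcur h
    obtain ⟨f', rfl⟩ : ∃ f', f = f' + 1 := ⟨f - 1, by omega⟩
    have hle' : pvUnvis U (PySem.Set.add ids cur) ≤ f' := by omega
    rw [pvLoopA, dif_neg h]
    rw [ih f' hle', pvPushAll, List.foldl_append, List.foldl_cons]
    -- identify the inner fold with one unfolding of pvVisitB
    have hvisit : pvVisitB deps (f' + 1) cur ids =
        ((deps.getD cur []).map pvId).reverse.foldl
          (fun ids c => pvVisitB deps f' c ids) (PySem.Set.add ids cur) := by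
      rw [pvVisitB_succ_neg deps f' cur ids h, ← List.map_reverse, List.foldl_map]
      rfl
    rw [← hvisit]
    -- bump the fuel on the remaining stack entries
    have hsub : ∀ x ∈ rest, x ∈ U := fun x hx => hs x (List.mem_cons_of_mem _ hx)
    have hmono : pvUnvis U (pvVisitB deps (f' + 1) cur ids) ≤ f' := by
      refine le_trans (pvUnvis_mono U (PySem.Set.add ids cur) _ ?_) hle'
      rw [hvisit]
      intro x hx
      exact pvFoldVisit_mono deps f' _ _ x hx
    rw [pvFold_stab deps U hd f' rest _ hsub hmono]

-- with no id visited yet, the unvisited count is just |U|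
theorem pvUnvis_empty (U : List Int) : pvUnvis U PySem.Set.empty = U.length := by
  unfold pvUnvis
  have h : ∀ x ∈ U, (!(PySem.Set.contains PySem.Set.empty x)) = true := by
    intro x _
    rfl
  rw [List.filter_eq_self.2 h]

-- ===== VERDICT (by name: the statement is the Claim_ definition above) =====
theorem get_subtree_word_ids_conllu_spec : Claim_equal_get_subtree_word_ids_conllu := by
  intro token_id sentence _ _
  unfold Spec_get_subtree_word_ids_conllu
  show pvLoopA _ _ _ _ _ _ = _
  rw [pvLoopA_eq_fold _ (token_id :: sentence.map pvId) _ PySem.Set.empty [token_id] _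
      (sentence.length + 1)
      (by rw [pvUnvis_empty]; simp)]
  rfl
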